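/- GENERATED by tools/from_farm_form.py from prooffarm-gif/accepted/DGifSlurp.9/Proof.lean (a worked proof of the farm's unit `DGifSlurp.9`,
   accepted by the verdict) — do not edit. -/
import Gif.Spec.Units.DGifSlurp_9
import Gif.Spec.AllSegs
import Gif.Spec.Proved.DGifSlurp_9_Lemmas

open X86 X86.User Asan ProgX.Base ProgX.Base.Spec Gif.Spec

/-!
  `DGifSlurp.9` (0x10a7d4 … 0x10a81f, 16 instructions; dgif_lib.c:1266-1273): THE MOVE of the pending extension list to the last
  counted image. The segment is one walk per arm of `if (GifFile->ExtensionBlocks)` (Lemmas.lean):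

      seg9_null     nothing is pending (`Fc.pend = none`): the checked load, `test ; je`; the forest stays
      seg9_move     a list `x` is pending: the four stores; the forest becomes `seg9_moved` (`seg9_move_mem`: `Shape.set_saved_pend`
                    with `SavedAt.set_last`, `Forest.owned_move_pend`)

  Which arm runs is decided by the ghost `Fc.pend` BEFORE the walk, so the walker prunes the other arm by itself.
-/

/-- Segment 9 of `DGifSlurp` takes `IR` at 0x10a7d4 to `Rec` at 0x10a81f, for the same forest (NULL) or the moved one. -/
theorem Gif.Spec.Proved.DGifSlurp_9_ok : Gif.Spec.DGifSlurp_9.Statement := by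
  intro Lay hLay μ hμ u₀ hcode h_load8 h_store8 h_load4 h_store4 H rest frames F R Hc Fc m e ret v hat
  -- 0x10a7d4 (dgif_lib.c:1266): is a list pending?
  cases hpend : Fc.pend with
  | none =>
    -- 0x10a7e4 `je` taken … 0x10a81f
    exact Gif.Spec.DGifSlurp_9.seg9_null Lay hLay μ hμ u₀ hcode h_load8 H rest frames F R Hc Fc m e ret v hat hpend
  | some x =>
    -- 0x10a7e6 … the four stores … 0x10a81f
    exact Gif.Spec.DGifSlurp_9.seg9_move Lay hLay μ hμ u₀ hcode h_load8 h_store8 h_load4 h_store4 H rest frames F R Hc Fc m e ret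
      v hat x hpend
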